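-- pv_equiv track=rewrite | github.com/limit5/OmniSight-Productizer | backend/design_token_loader.py | _parse_raw_declarations
-- ===== SOURCE A (Python) =====
-- def _remove_nested_blocks(body: str) -> str:
--     """Strip any nested ``{ … }`` blocks from a block body.
--
--     Lets :func:`_parse_declarations` see only the top-level
--     declarations of the enclosing scope.
--     """
--     out: list[str] = []
--     depth = 0
--     for ch in body:
--         if ch == "{":
--             depth += 1
--             continue
--         if ch == "}":
--             depth = max(0, depth - 1)
--             continue
--         if depth == 0:
--             out.append(ch)
--     return "".join(out)
--
-- def _split_declarations(body: str) -> list[str]: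
--     """Split a declaration list on ``;`` while respecting parentheses.
--
--     We cannot use a plain ``.split(";")`` because values like
--     ``rgba(0, 0, 0, 0.5)`` do not contain semicolons but ``oklch(0.5 0
--     0 / 0.5)`` might contain a slash, and nested ``var(a, var(b))``
--     may contain commas.  Semicolons only terminate declarations when
--     paren-depth is zero.
--     """
--     out: list[str] = []
--     depth = 0
--     buf: list[str] = []
--     for ch in body:
--         if ch == "(":
--             depth += 1
--             buf.append(ch)
--         elif ch == ")":
--             depth = max(0, depth - 1)
--             buf.append(ch)
--         elif ch == ";" and depth == 0:
--             out.append("".join(buf))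
--             buf = []
--         else:
--             buf.append(ch)
--     if buf:
--         out.append("".join(buf))
--     return out
--
-- def _parse_raw_declarations(body: str) -> list[tuple[str, str]]:
--     """Return ``(property, value)`` pairs for ALL declarations.
--
--     Used by the ``html { color-scheme: dark; }`` detection path where
--     we care about non-custom properties too.
--     """
--     decls: list[tuple[str, str]] = []
--     top_level = _remove_nested_blocks(body)
--     for raw in _split_declarations(top_level):
--         raw = raw.strip()
--         if not raw or ":" not in raw:
--             continue
--         name, _, value = raw.partition(":")
--         name = name.strip()
--         value = value.strip().rstrip(";").strip()
--         if not name or not value: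
--             continue
--         decls.append((name, value))
--     return decls
-- ===== SOURCE B (Python) =====
-- def _parse_raw_declarations(body: str) -> list[tuple[str, str]]:
--     """Single pass: one state machine with brace- and paren-depth counters,
--     no intermediate cleaned string."""
--
--     def _norm(buf):
--         raw = "".join(buf).strip()
--         if not raw or ":" not in raw:
--             return []
--         name, _, value = raw.partition(":")
--         name = name.strip()
--         value = value.strip().rstrip(";").strip()
--         if not name or not value:
--             return []
--         return [(name, value)]
--
--     decls: list[tuple[str, str]] = []
--     brace = 0
--     paren = 0
--     buf: list[str] = []
--     for ch in body:
--         if ch == "{":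
--             brace += 1
--         elif ch == "}":
--             brace = max(0, brace - 1)
--         elif brace:
--             continue
--         elif ch == "(":
--             paren += 1
--             buf.append(ch)
--         elif ch == ")":
--             paren = max(0, paren - 1)
--             buf.append(ch)
--         elif ch == ";" and paren == 0:
--             decls.extend(_norm(buf))
--             buf = []
--         else:
--             buf.append(ch)
--     decls.extend(_norm(buf))
--     return decls
-- ===== Notes on version B (the rewrite author's own statement) =====
-- stated objective: alternative
-- what changed: Fused A's two-helper pipeline (build a brace-stripped string, then paren-aware split, then normalize each piece) into one single-pass state machine maintaining brace depth, paren depth, a buffer and the result list, with no intermediate string.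
import Mathlib
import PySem

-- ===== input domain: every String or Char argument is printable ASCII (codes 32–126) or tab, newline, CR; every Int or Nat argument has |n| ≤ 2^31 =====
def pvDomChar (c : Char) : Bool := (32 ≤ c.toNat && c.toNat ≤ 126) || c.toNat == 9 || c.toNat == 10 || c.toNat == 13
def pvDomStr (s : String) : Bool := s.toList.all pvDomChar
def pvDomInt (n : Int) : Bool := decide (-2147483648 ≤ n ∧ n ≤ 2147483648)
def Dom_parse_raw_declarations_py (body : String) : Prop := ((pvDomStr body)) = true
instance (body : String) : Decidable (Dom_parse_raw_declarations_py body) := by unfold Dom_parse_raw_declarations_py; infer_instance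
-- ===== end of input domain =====

-- B fuses A's two-helper pipeline (strip nested braces, then paren-aware split) into one
-- single-pass state machine with brace and paren depth counters; same cost, no intermediate string.


-- ===== PORT A =====
-- per-declaration normalization (identical code in A's loop body and in Source B's _norm helper):
-- strip; require ':'; partition on the FIRST ':' (hand-ported for the 1-char separator via
-- takeWhile/dropWhile — exact); name.strip(); value.strip().rstrip(";").strip() with rstrip(";")
-- hand-ported as dropping trailing ';' via reverse/dropWhile — exact.
def pvNormDecl (raw0 : List Char) : Option (String × String) :=
  let raw := PySem.Chars.strip raw0
  if raw.isEmpty then none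
  else if PySem.Chars.isIn [':'] raw = false then none
  else
    let name := PySem.Chars.strip (raw.takeWhile (fun c => c ≠ ':'))
    let value0 := PySem.Chars.strip ((raw.dropWhile (fun c => c ≠ ':')).tail)
    let value := PySem.Chars.strip ((value0.reverse.dropWhile (fun c => c = ';')).reverse)
    if name.isEmpty || value.isEmpty then none
    else some (String.ofList name, String.ofList value)

-- _remove_nested_blocks: Python's depth is clamped with max(0, depth-1), which is Nat subtraction
def pvRemoveNested : Nat → List Char → List Char
  | _, [] => []
  | d, c :: cs =>
    if c = '{' then pvRemoveNested (d + 1) cs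
    else if c = '}' then pvRemoveNested (d - 1) cs
    else if d = 0 then c :: pvRemoveNested 0 cs
    else pvRemoveNested d cs

-- _split_declarations
def pvSplitDecls : Nat → List Char → List Char → List (List Char)
  | _, buf, [] => if buf.isEmpty then [] else [buf]
  | p, buf, c :: cs =>
    if c = '(' then pvSplitDecls (p + 1) (buf ++ [c]) cs
    else if c = ')' then pvSplitDecls (p - 1) (buf ++ [c]) cs
    else if c = ';' ∧ p = 0 then buf :: pvSplitDecls p [] cs
    else pvSplitDecls p (buf ++ [c]) cs

def parse_raw_declarations_py (body : String) : List (String × String) :=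
  (pvSplitDecls 0 [] (pvRemoveNested 0 body.toList)).foldl
    (fun decls raw =>
      match pvNormDecl raw with
      | some pv => decls ++ [pv]
      | none => decls) []

-- ===== PORT B =====
-- single pass: brace depth, paren depth, buffer, accumulated declarations
def pvScan : Nat → Nat → List Char → List (String × String) → List Char → List (String × String)
  | _, _, buf, decls, [] => decls ++ (pvNormDecl buf).toList
  | b, p, buf, decls, c :: cs =>
    if c = '{' then pvScan (b + 1) p buf decls cs
    else if c = '}' then pvScan (b - 1) p buf decls cs
    else if b ≠ 0 then pvScan b p buf decls cs
    else if c = '(' then pvScan b (p + 1) (buf ++ [c]) decls cs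
    else if c = ')' then pvScan b (p - 1) (buf ++ [c]) decls cs
    else if c = ';' ∧ p = 0 then pvScan b p [] (decls ++ (pvNormDecl buf).toList) cs
    else pvScan b p (buf ++ [c]) decls cs

def parse_raw_declarations_py_alt (body : String) : List (String × String) :=
  pvScan 0 0 [] [] body.toList

-- ===== PRECONDITION & SPEC =====
def Spec_parse_raw_declarations_py (body : String) (out : List (String × String)) : Prop := out = parse_raw_declarations_py_alt body
instance (body : String) (out : List (String × String)) : Decidable (Spec_parse_raw_declarations_py body out) := by unfold Spec_parse_raw_declarations_py; infer_instance

-- ===== CLAIM (what is proved, stated in full; the proofs are below) =====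
def Claim_equal_parse_raw_declarations_py : Prop := ∀ (body : String), Dom_parse_raw_declarations_py body → Spec_parse_raw_declarations_py body (parse_raw_declarations_py body)

-- ===== LEMMAS AND PROOFS =====

-- A's loop body appends pvNormDecl's result (as a list) to the accumulator
lemma pvFoldA_eq (raws : List (List Char)) (init : List (String × String)) :
    raws.foldl
      (fun decls raw =>
        match pvNormDecl raw with
        | some pv => decls ++ [pv]
        | none => decls) init
    = init ++ raws.flatMap (fun raw => (pvNormDecl raw).toList) := by
  induction raws generalizing init with
  | nil => simp
  | cons r rs ih =>
    simp only [List.foldl_cons, List.flatMap_cons, ih]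
    cases h : pvNormDecl r <;> simp

lemma pvNormDecl_nil : pvNormDecl [] = none := by decide

-- main invariant: the single pass equals "strip braces, then split, then normalize each piece"
lemma pvScan_eq (cs : List Char) : ∀ (b p : Nat) (buf : List Char) (decls : List (String × String)),
    pvScan b p buf decls cs
    = decls ++ (pvSplitDecls p buf (pvRemoveNested b cs)).flatMap
        (fun raw => (pvNormDecl raw).toList) := by
  induction cs with
  | nil =>
    intro b p buf decls
    by_cases h : buf.isEmpty
    · have : buf = [] := by simpa [List.isEmpty_iff] using h
      subst this
      simp [pvScan, pvRemoveNested, pvSplitDecls, pvNormDecl_nil]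
    · simp [pvScan, pvRemoveNested, pvSplitDecls, h]
  | cons c cs ih =>
    intro b p buf decls
    by_cases hbr : c = '{'
    · simp [pvScan, pvRemoveNested, hbr, ih]
    · by_cases hbl : c = '}'
      · simp [pvScan, pvRemoveNested, hbl, ih]
      · by_cases hb : b = 0
        · subst hb
          by_cases hp : c = '('
          · simp [pvScan, pvRemoveNested, pvSplitDecls, hbr, hbl, hp, ih]
          · by_cases hq : c = ')'
            · simp [pvScan, pvRemoveNested, pvSplitDecls, hbr, hbl, hp, hq, ih]
            · by_cases hs : c = ';' ∧ p = 0
              · simp [pvScan, pvRemoveNested, pvSplitDecls, hbr, hbl, hp, hq, hs, ih]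
              · simp [pvScan, pvRemoveNested, pvSplitDecls, hbr, hbl, hp, hq, hs, ih]
        · simp [pvScan, pvRemoveNested, hbr, hbl, hb, ih]

-- ===== VERDICT (by name: the statement is the Claim_ definition above) =====
theorem parse_raw_declarations_py_spec : Claim_equal_parse_raw_declarations_py := by
  intro body _
  unfold Spec_parse_raw_declarations_py parse_raw_declarations_py parse_raw_declarations_py_alt
  rw [pvFoldA_eq, pvScan_eq]
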